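-- pv_equiv track=rewrite | github.com/captainbarmaley/Learn | Python/decoder_4to16.py | decoder4to16
-- ===== SOURCE A (Python) =====
-- def NOT(a): return 1 - a
--
-- def AND(*args):
--     result = 1
--     for x in args:
--         result &= x
--     return result
--
-- def decoder2to4(A1, A0):
--     return [
--         AND(NOT(A1), NOT(A0)),
--         AND(NOT(A1),     A0),
--         AND(    A1,  NOT(A0)),
--         AND(    A1,      A0),
--     ]
--
-- def decoder4to16(A3, A2, A1, A0):
--     enable_lines = decoder2to4(A3, A2) # 4 блока
--     sub_outputs = decoder2to4(A1, A0) # 4 выхода в блоке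
--
--     Y = [0] * 16
--     for i in range(4): # по блокам
--         for j in range(4): # по линиям в блоке
--             Y[i * 4 + j] = AND(enable_lines[i], sub_outputs[j])
--     return Y
-- ===== SOURCE B (Python) =====
-- def NOT(a): return 1 - a
--
-- def AND(*args):
--     result = 1
--     for x in args:
--         result &= x
--     return result
--
-- def decoder4to16(A3, A2, A1, A0):
--     return [
--         AND(A3 if k & 8 else NOT(A3),
--             A2 if k & 4 else NOT(A2),
--             A1 if k & 2 else NOT(A1),
--             A0 if k & 1 else NOT(A0))
--         for k in range(16)
--     ]
-- ===== Notes on version B (the rewrite author's own statement) =====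
-- stated objective: simpler
-- what changed: Replaces the two-sub-decoder composition (two decoder2to4 calls Kronecker-combined by a nested 4x4 loop into a preallocated list) with one flat comprehension over k in range(16) that ANDs each input, negated or not according to the corresponding bit of k.
import Mathlib
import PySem

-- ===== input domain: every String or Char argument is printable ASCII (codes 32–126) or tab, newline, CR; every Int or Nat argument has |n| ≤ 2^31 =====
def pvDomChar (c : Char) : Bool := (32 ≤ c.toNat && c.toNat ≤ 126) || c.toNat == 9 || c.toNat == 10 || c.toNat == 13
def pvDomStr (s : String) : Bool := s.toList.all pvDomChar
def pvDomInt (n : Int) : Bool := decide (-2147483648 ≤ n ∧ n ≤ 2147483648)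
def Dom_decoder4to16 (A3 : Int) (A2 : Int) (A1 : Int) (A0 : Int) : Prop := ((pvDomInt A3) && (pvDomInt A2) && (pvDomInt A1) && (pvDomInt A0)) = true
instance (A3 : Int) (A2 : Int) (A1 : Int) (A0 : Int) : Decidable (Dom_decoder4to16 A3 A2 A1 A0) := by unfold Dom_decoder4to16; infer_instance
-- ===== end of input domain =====

-- B replaces A's two decoder2to4 sub-decoders Kronecker-combined by a nested 4x4 loop with one
-- flat pass over k in range(16), selecting each input un-negated or NOTed by k's bits (simpler).

-- ===== PORT A =====
def pyNOT (a : Int) : Int := 1 - a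

-- Python's 'result &= x' on int is bitwise and: Int.land (exact)
def pyAND (args : List Int) : Int := args.foldl (fun r x => Int.land r x) 1

def decoder2to4 (A1 : Int) (A0 : Int) : List Int :=
  [ pyAND [pyNOT A1, pyNOT A0],
    pyAND [pyNOT A1, A0],
    pyAND [A1, pyNOT A0],
    pyAND [A1, A0] ]

def decoder4to16 (A3 : Int) (A2 : Int) (A1 : Int) (A0 : Int) : List Int :=
  let enable_lines := decoder2to4 A3 A2
  let sub_outputs := decoder2to4 A1 A0
  let Y : List Int := List.replicate 16 0
  -- Y[i*4+j] = AND(enable_lines[i], sub_outputs[j]); the indices are always in range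
  (PySem.List.pyRange 0 4 1).foldl (fun Y i =>
    (PySem.List.pyRange 0 4 1).foldl (fun Y j =>
      Y.set (i * 4 + j).toNat
        (pyAND [(PySem.List.pyGet? enable_lines i).getD 0,
                (PySem.List.pyGet? sub_outputs j).getD 0])) Y) Y

-- ===== PORT B =====
-- 'A3 if k & 8 else NOT(A3)': Python truthiness of an int is ≠ 0 (exact)
def decoder4to16_alt (A3 : Int) (A2 : Int) (A1 : Int) (A0 : Int) : List Int :=
  (PySem.List.pyRange 0 16 1).map (fun k =>
    pyAND [ if Int.land k 8 ≠ 0 then A3 else pyNOT A3,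
            if Int.land k 4 ≠ 0 then A2 else pyNOT A2,
            if Int.land k 2 ≠ 0 then A1 else pyNOT A1,
            if Int.land k 1 ≠ 0 then A0 else pyNOT A0 ])

-- ===== PRECONDITION & SPEC =====
def Spec_decoder4to16 (A3 : Int) (A2 : Int) (A1 : Int) (A0 : Int) (out : List Int) : Prop := out = decoder4to16_alt A3 A2 A1 A0
instance (A3 : Int) (A2 : Int) (A1 : Int) (A0 : Int) (out : List Int) : Decidable (Spec_decoder4to16 A3 A2 A1 A0 out) := by unfold Spec_decoder4to16; infer_instance

-- ===== CLAIM (what is proved, stated in full; the proofs are below) =====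
def Claim_equal_decoder4to16 : Prop := ∀ (A3 : Int) (A2 : Int) (A1 : Int) (A0 : Int), Dom_decoder4to16 A3 A2 A1 A0 → Spec_decoder4to16 A3 A2 A1 A0 (decoder4to16 A3 A2 A1 A0)

-- ===== LEMMAS AND PROOFS =====
theorem pv_land_comm (a b : Int) : a.land b = b.land a := by
  cases a <;> cases b <;> simp [Int.land, Nat.land_comm, Nat.lor_comm]

theorem pv_land_assoc (a b c : Int) : (a.land b).land c = a.land (b.land c) := by
  cases a <;> cases b <;> cases c <;>
    · simp only [Int.land]
      congr 1
      apply Nat.eq_of_testBit_eq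
      intro i
      simp [Nat.testBit_land, Nat.testBit_ldiff, Nat.testBit_lor,
        Bool.and_assoc, Bool.and_comm, Bool.and_left_comm, Bool.not_or, Bool.or_assoc]

theorem pv_land_left_comm (a b c : Int) : a.land (b.land c) = b.land (a.land c) := by
  rw [← pv_land_assoc, pv_land_comm a b, pv_land_assoc]

theorem pv_one_land_idem (x : Int) : Int.land 1 (Int.land 1 x) = Int.land 1 x := by
  have h : Int.land 1 1 = 1 := by decide
  rw [← pv_land_assoc, h]

-- ===== VERDICT (by name: the statement is the Claim_ definition above) =====
theorem decoder4to16_spec : Claim_equal_decoder4to16 := by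
  intro A3 A2 A1 A0 _
  have h4 : PySem.List.pyRange 0 4 1 = [0,1,2,3] := by decide
  have h16 : PySem.List.pyRange 0 16 1 = [0,1,2,3,4,5,6,7,8,9,10,11,12,13,14,15] := by decide
  unfold Spec_decoder4to16 decoder4to16 decoder4to16_alt decoder2to4 pyAND pyNOT
  rw [h4, h16]
  simp only [PySem.List.pyGet?, PySem.List.pyIdx?, List.foldl_cons, List.foldl_nil,
    List.map_cons, List.map_nil, List.replicate,
    show Int.land 0 8 = 0 from by decide,
    show Int.land 0 4 = 0 from by decide,
    show Int.land 0 2 = 0 from by decide,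
    show Int.land 0 1 = 0 from by decide,
    show Int.land 1 8 = 0 from by decide,
    show Int.land 1 4 = 0 from by decide,
    show Int.land 1 2 = 0 from by decide,
    show Int.land 1 1 = 1 from by decide,
    show Int.land 2 8 = 0 from by decide,
    show Int.land 2 4 = 0 from by decide,
    show Int.land 2 2 = 2 from by decide,
    show Int.land 2 1 = 0 from by decide,
    show Int.land 3 8 = 0 from by decide,
    show Int.land 3 4 = 0 from by decide,
    show Int.land 3 2 = 2 from by decide,
    show Int.land 3 1 = 1 from by decide,
    show Int.land 4 8 = 0 from by decide,
    show Int.land 4 4 = 4 from by decide,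
    show Int.land 4 2 = 0 from by decide,
    show Int.land 4 1 = 0 from by decide,
    show Int.land 5 8 = 0 from by decide,
    show Int.land 5 4 = 4 from by decide,
    show Int.land 5 2 = 0 from by decide,
    show Int.land 5 1 = 1 from by decide,
    show Int.land 6 8 = 0 from by decide,
    show Int.land 6 4 = 4 from by decide,
    show Int.land 6 2 = 2 from by decide,
    show Int.land 6 1 = 0 from by decide,
    show Int.land 7 8 = 0 from by decide,
    show Int.land 7 4 = 4 from by decide,
    show Int.land 7 2 = 2 from by decide,
    show Int.land 7 1 = 1 from by decide,
    show Int.land 8 8 = 8 from by decide,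
    show Int.land 8 4 = 0 from by decide,
    show Int.land 8 2 = 0 from by decide,
    show Int.land 8 1 = 0 from by decide,
    show Int.land 9 8 = 8 from by decide,
    show Int.land 9 4 = 0 from by decide,
    show Int.land 9 2 = 0 from by decide,
    show Int.land 9 1 = 1 from by decide,
    show Int.land 10 8 = 8 from by decide,
    show Int.land 10 4 = 0 from by decide,
    show Int.land 10 2 = 2 from by decide,
    show Int.land 10 1 = 0 from by decide,
    show Int.land 11 8 = 8 from by decide,
    show Int.land 11 4 = 0 from by decide,
    show Int.land 11 2 = 2 from by decide,
    show Int.land 11 1 = 1 from by decide,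
    show Int.land 12 8 = 8 from by decide,
    show Int.land 12 4 = 4 from by decide,
    show Int.land 12 2 = 0 from by decide,
    show Int.land 12 1 = 0 from by decide,
    show Int.land 13 8 = 8 from by decide,
    show Int.land 13 4 = 4 from by decide,
    show Int.land 13 2 = 0 from by decide,
    show Int.land 13 1 = 1 from by decide,
    show Int.land 14 8 = 8 from by decide,
    show Int.land 14 4 = 4 from by decide,
    show Int.land 14 2 = 2 from by decide,
    show Int.land 14 1 = 0 from by decide,
    show Int.land 15 8 = 8 from by decide,
    show Int.land 15 4 = 4 from by decide,
    show Int.land 15 2 = 2 from by decide,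
    show Int.land 15 1 = 1 from by decide,
    show Int.toNat 0 = 0 from rfl,
    show Int.toNat 1 = 1 from rfl,
    show Int.toNat 2 = 2 from rfl,
    show Int.toNat 3 = 3 from rfl,
    show Int.toNat 4 = 4 from rfl,
    show Int.toNat 5 = 5 from rfl,
    show Int.toNat 6 = 6 from rfl,
    show Int.toNat 7 = 7 from rfl,
    show Int.toNat 8 = 8 from rfl,
    show Int.toNat 9 = 9 from rfl,
    show Int.toNat 10 = 10 from rfl,
    show Int.toNat 11 = 11 from rfl,
    show Int.toNat 12 = 12 from rfl,
    show Int.toNat 13 = 13 from rfl,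
    show Int.toNat 14 = 14 from rfl,
    show Int.toNat 15 = 15 from rfl]
  simp
  norm_num [pv_land_assoc, pv_land_comm, pv_land_left_comm, pv_one_land_idem,
    show Int.land 1 1 = 1 from by decide]
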